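-- pv_equiv track=rewrite | github.com/aheritianad/BootCamp-BlockChain-and-Python | bcbcpy/math/arithmetic.py | fast_multiplication
-- ===== SOURCE A (Python) =====
-- from typing import List, Union, TypeVar, Optional
--
-- T = TypeVar("T")
--
-- def fast_multiplication(x: T, n: int, mod: Optional[T] = None):
--     """
--     Compute `(n*x)%mod = (x + x + ... + x)%mod`.
--
--     `x` needs to have `__add__` and `__radd__` implemented such that `0 + x` is equal to `x`.
--     """
--     assert not n < 0
--     out = 0
--     for i in bin(n)[2:]:
--         out += out
--         if i == "1":
--             out += x
--         if mod is not None: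
--             out %= mod
--     return out
-- ===== SOURCE B (Python) =====
-- def fast_multiplication(x, n, mod=None):
--     """Right-to-left binary (double-and-add) multiplication: (n*x) % mod."""
--     assert not n < 0
--     out = 0
--     addend = x
--     while n > 0:
--         if n & 1:
--             out += addend
--             if mod is not None:
--                 out %= mod
--         addend += addend
--         if mod is not None:
--             addend %= mod
--         n >>= 1
--     if mod is not None:
--         out %= mod
--     return out
-- ===== Notes on version B (the rewrite author's own statement) =====
-- stated objective: alternative
-- what changed: Replaces the left-to-right scan of the string bin(n)[2:] (MSB-first Horner doubling of the accumulator) with a right-to-left while-loop over n itself that squares/doubles a separate addend and adds it on set bits, with one final reduction.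
import Mathlib
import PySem

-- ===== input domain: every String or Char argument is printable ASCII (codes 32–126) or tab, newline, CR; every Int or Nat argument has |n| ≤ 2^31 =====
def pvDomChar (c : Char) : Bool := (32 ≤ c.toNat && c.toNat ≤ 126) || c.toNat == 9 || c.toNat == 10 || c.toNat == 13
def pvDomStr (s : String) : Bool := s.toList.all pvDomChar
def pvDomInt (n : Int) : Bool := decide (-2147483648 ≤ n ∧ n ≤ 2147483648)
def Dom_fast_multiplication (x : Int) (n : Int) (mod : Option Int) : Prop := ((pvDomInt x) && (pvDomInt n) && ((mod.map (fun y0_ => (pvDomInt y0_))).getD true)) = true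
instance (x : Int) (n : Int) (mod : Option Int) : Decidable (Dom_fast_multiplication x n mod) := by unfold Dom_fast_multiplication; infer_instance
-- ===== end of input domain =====

-- B replaces A's MSB-first scan of the string bin(n)[2:] by a right-to-left while-loop over n
-- that doubles a separate addend and adds it on set bits (objective: alternative decomposition).

-- ===== PORT A =====
-- Bits of bin(m)[2:], MSB first, as Bools; exact for m ≥ 0 (bin(0)[2:] = "0").
def pyBits (m : Nat) : List Bool :=
  if h : m = 0 then [] else pyBits (m / 2) ++ [decide (m % 2 = 1)]
decreasing_by exact Nat.div_lt_self (Nat.pos_of_ne_zero h) (by omega)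

def binDigits (m : Nat) : List Bool := if m = 0 then [false] else pyBits m

-- one iteration of A's for-loop over the digit characters
def stepA (x : Int) (mod : Option Int) (out : Int) (b : Bool) : Int :=
  let o := out + out
  let o := if b then o + x else o
  match mod with
  | some m => PySem.Int.mod o m
  | none => o

def fast_multiplication (x : Int) (n : Int) (mod : Option Int) : Int :=
  if n < 0 then 0   -- `assert not n < 0` raises here: outside Pre_
  else (binDigits n.toNat).foldl (stepA x mod) 0

-- ===== PORT B =====
-- the while-loop of Source B: state (out, addend), n halved each turn
def goB (mod : Option Int) (k : Nat) (out addend : Int) : Int :=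
  if h : k = 0 then out
  else
    let out := if k % 2 = 1 then
        (match mod with | some m => PySem.Int.mod (out + addend) m | none => out + addend)
      else out
    let addend := match mod with | some m => PySem.Int.mod (addend + addend) m | none => addend + addend
    goB mod (k / 2) out addend
decreasing_by exact Nat.div_lt_self (Nat.pos_of_ne_zero h) (by omega)

def fast_multiplication_alt (x : Int) (n : Int) (mod : Option Int) : Int :=
  if n < 0 then 0   -- `assert not n < 0` raises here: outside Pre_
  else
    let out := goB mod n.toNat 0 x
    match mod with
    | some m => PySem.Int.mod out m
    | none => out

-- ===== PRECONDITION & SPEC =====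
-- Pre_ excludes exactly where A raises: n < 0 (AssertionError) and mod == 0 (ZeroDivisionError).
def Pre_fast_multiplication (x : Int) (n : Int) (mod : Option Int) : Prop :=
  0 ≤ n ∧ mod ≠ some 0
instance (x : Int) (n : Int) (mod : Option Int) : Decidable (Pre_fast_multiplication x n mod) := by
  unfold Pre_fast_multiplication; infer_instance

def pvWitness_fast_multiplication : Int × Int × Option Int := (3, 5, some 7)

def Spec_fast_multiplication (x : Int) (n : Int) (mod : Option Int) (out : Int) : Prop := out = fast_multiplication_alt x n mod
instance (x : Int) (n : Int) (mod : Option Int) (out : Int) : Decidable (Spec_fast_multiplication x n mod out) := by unfold Spec_fast_multiplication; infer_instance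

-- ===== CLAIM (what is proved, stated in full; the proofs are below) =====
def Claim_equal_fast_multiplication : Prop := ∀ (x : Int) (n : Int) (mod : Option Int), Dom_fast_multiplication x n mod → Pre_fast_multiplication x n mod → Spec_fast_multiplication x n mod (fast_multiplication x n mod)

-- ===== LEMMAS AND PROOFS =====

-- Python's floored % is a fixed congruence representative: equal on congruent arguments
theorem fmod_sub_self (a m : Int) : m ∣ (PySem.Int.mod a m - a) := by
  have h := PySem.Int.floordiv_mul_add_mod a m
  exact ⟨-(PySem.Int.floordiv a m), by linarith [h]⟩

theorem fmod_congr {m : Int} (hm : m ≠ 0) {a b : Int} (h : m ∣ a - b) :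
    PySem.Int.mod a m = PySem.Int.mod b m := by
  have hd : m ∣ (PySem.Int.mod a m - PySem.Int.mod b m) := by
    have h1 := fmod_sub_self a m
    have h2 := fmod_sub_self b m
    have : PySem.Int.mod a m - PySem.Int.mod b m
        = (PySem.Int.mod a m - a) - (PySem.Int.mod b m - b) + (a - b) := by ring
    rw [this]; exact dvd_add (dvd_sub h1 h2) h
  rcases lt_or_gt_of_ne hm with hneg | hpos
  · have b1 := PySem.Int.mod_neg_bounds a hneg
    have b2 := PySem.Int.mod_neg_bounds b hneg
    have habs : |PySem.Int.mod a m - PySem.Int.mod b m| < |m| := by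
      rw [abs_lt, abs_of_neg hneg]; omega
    have := Int.eq_zero_of_abs_lt_dvd ((abs_dvd m _).mpr hd) habs
    omega
  · have b1l := PySem.Int.mod_nonneg a hpos
    have b1u := PySem.Int.mod_lt a hpos
    have b2l := PySem.Int.mod_nonneg b hpos
    have b2u := PySem.Int.mod_lt b hpos
    have habs : |PySem.Int.mod a m - PySem.Int.mod b m| < |m| := by
      rw [abs_lt, abs_of_pos hpos]; omega
    have := Int.eq_zero_of_abs_lt_dvd ((abs_dvd m _).mpr hd) habs
    omega

theorem fmod_zero (m : Int) (hm : m ≠ 0) : PySem.Int.mod 0 m = 0 := by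
  have hd := fmod_sub_self 0 m
  rcases lt_or_gt_of_ne hm with hneg | hpos
  · have b1 := PySem.Int.mod_neg_bounds 0 hneg
    have := Int.eq_zero_of_abs_lt_dvd ((abs_dvd m _).mpr (by simpa using hd))
      (by rw [abs_lt, abs_of_neg hneg]; omega)
    omega
  · have b1l := PySem.Int.mod_nonneg 0 hpos
    have b1u := PySem.Int.mod_lt 0 hpos
    have := Int.eq_zero_of_abs_lt_dvd ((abs_dvd m _).mpr (by simpa using hd))
      (by rw [abs_lt, abs_of_pos hpos]; omega)
    omega

def bitI (b : Bool) : Int := if b then 1 else 0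

-- MSB-first value of a bit list
def bval : List Bool → Int
  | [] => 0
  | b :: bs => bitI b * 2 ^ bs.length + bval bs

theorem bval_append_singleton (l : List Bool) (b : Bool) :
    bval (l ++ [b]) = 2 * bval l + bitI b := by
  induction l with
  | nil => simp [bval, bitI]
  | cons c l ih =>
      simp only [List.cons_append, bval, ih, List.length_append, List.length_cons,
        List.length_nil]
      ring

theorem bval_pyBits (m : Nat) : bval (pyBits m) = (m : Int) := by
  induction m using Nat.strong_induction_on with
  | _ m ih =>
    rw [pyBits]
    by_cases h : m = 0
    · simp [h, bval]
    · simp only [h, dite_false]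
      rw [bval_append_singleton, ih (m / 2) (Nat.div_lt_self (Nat.pos_of_ne_zero h) (by omega))]
      have := Nat.div_add_mod m 2
      rcases Nat.mod_two_eq_zero_or_one m with he | ho
      · simp [he, bitI]; omega
      · simp [ho, bitI]; omega

theorem bval_binDigits (m : Nat) : bval (binDigits m) = (m : Int) := by
  unfold binDigits
  by_cases h : m = 0
  · simp [h, bval, bitI]
  · simp [h, bval_pyBits]

-- A's fold, mod-free case
theorem foldA_none (x : Int) : ∀ (bs : List Bool) (a : Int),
    bs.foldl (stepA x none) a = a * 2 ^ bs.length + bval bs * x := by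
  intro bs
  induction bs with
  | nil => intro a; simp [bval]
  | cons b bs ih =>
      intro a
      simp only [List.foldl_cons, ih, stepA, bval, List.length_cons]
      cases b <;> simp [bitI] <;> ring

-- A's fold with a modulus: accumulator stays a residue
theorem foldA_some (x m : Int) (hm : m ≠ 0) : ∀ (bs : List Bool) (a : Int),
    bs.foldl (stepA x (some m)) (PySem.Int.mod a m)
      = PySem.Int.mod (a * 2 ^ bs.length + bval bs * x) m := by
  intro bs
  induction bs with
  | nil => intro a; simp [bval]
  | cons b bs ih =>
      intro a
      have hstep : stepA x (some m) (PySem.Int.mod a m) b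
          = PySem.Int.mod ((a + a) + bitI b * x) m := by
        unfold stepA
        cases b <;> simp only [if_true, bitI] <;>
          · refine fmod_congr hm ?_
            have := fmod_sub_self a m
            rcases this with ⟨k, hk⟩
            exact ⟨2 * k, by simp; linarith⟩
      rw [List.foldl_cons, hstep, ih]
      congr 1
      simp only [bval, List.length_cons]
      ring

-- B's loop: outer mod of the state equals outer mod of out + k * addend
theorem goB_none : ∀ (k : Nat) (o a : Int), goB none k o a = o + (k : Int) * a := by
  intro k
  induction k using Nat.strong_induction_on with
  | _ k ih =>
    intro o a
    rw [goB]
    by_cases h : k = 0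
    · simp [h]
    · simp only [h, dite_false]
      rw [ih (k / 2) (Nat.div_lt_self (Nat.pos_of_ne_zero h) (by omega))]
      have hk2 : ((k / 2 : Nat) : Int) * 2 + ((k % 2 : Nat) : Int) = (k : Int) := by
        exact_mod_cast (by omega : k / 2 * 2 + k % 2 = k)
      rcases Nat.mod_two_eq_zero_or_one k with he | ho
      · rw [if_neg (by omega)]
        have hr : ((k % 2 : Nat) : Int) = 0 := by rw [he]; norm_num
        rw [hr] at hk2
        rw [← hk2]; ring
      · rw [if_pos (by omega)]
        have hr : ((k % 2 : Nat) : Int) = 1 := by rw [ho]; norm_num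
        rw [hr] at hk2
        rw [← hk2]; ring

theorem goB_some (m : Int) (hm : m ≠ 0) : ∀ (k : Nat) (o a : Int),
    PySem.Int.mod (goB (some m) k o a) m = PySem.Int.mod (o + (k : Int) * a) m := by
  intro k
  induction k using Nat.strong_induction_on with
  | _ k ih =>
    intro o a
    rw [goB]
    by_cases h : k = 0
    · simp [h]
    · simp only [h, dite_false]
      rw [ih (k / 2) (Nat.div_lt_self (Nat.pos_of_ne_zero h) (by omega))]
      -- the new state is congruent to (o + (k%2)*a, 2a)
      obtain ⟨ka, hka⟩ := fmod_sub_self (a + a) m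
      have hk2 : ((k / 2 : Nat) : Int) * 2 + ((k % 2 : Nat) : Int) = (k : Int) := by
        exact_mod_cast (by omega : k / 2 * 2 + k % 2 = k)
      rcases Nat.mod_two_eq_zero_or_one k with he | ho
      · rw [if_neg (by omega)]
        have hr : ((k % 2 : Nat) : Int) = 0 := by rw [he]; norm_num
        rw [hr] at hk2
        refine fmod_congr hm ⟨((k / 2 : Nat) : Int) * ka, ?_⟩
        linear_combination ((k / 2 : Nat) : Int) * hka + a * hk2
      · rw [if_pos (by omega)]
        have hr : ((k % 2 : Nat) : Int) = 1 := by rw [ho]; norm_num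
        rw [hr] at hk2
        obtain ⟨ko, hko⟩ := fmod_sub_self (o + a) m
        refine fmod_congr hm ⟨ko + ((k / 2 : Nat) : Int) * ka, ?_⟩
        linear_combination hko + ((k / 2 : Nat) : Int) * hka + a * hk2

-- ===== VERDICT (by name: the statement is the Claim_ definition above) =====
theorem fast_multiplication_spec : Claim_equal_fast_multiplication := by
  intro x n mod _ hpre
  obtain ⟨hn, hmod⟩ := hpre
  unfold Spec_fast_multiplication fast_multiplication fast_multiplication_alt
  have hnlt : ¬ n < 0 := by omega
  simp only [hnlt, if_false]
  cases mod with
  | none =>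
      rw [foldA_none, goB_none, bval_binDigits]
      ring
  | some m =>
      have hm : m ≠ 0 := by intro h; exact hmod (by rw [h])
      have h0 : (0 : Int) = PySem.Int.mod 0 m := (fmod_zero m hm).symm
      calc (binDigits n.toNat).foldl (stepA x (some m)) 0
          = (binDigits n.toNat).foldl (stepA x (some m)) (PySem.Int.mod 0 m) := by rw [← h0]
        _ = PySem.Int.mod (0 * 2 ^ (binDigits n.toNat).length + bval (binDigits n.toNat) * x) m :=
            foldA_some x m hm _ 0
        _ = PySem.Int.mod (0 + (n.toNat : Int) * x) m := by rw [bval_binDigits]; ring_nf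
        _ = PySem.Int.mod (goB (some m) n.toNat 0 x) m := (goB_some m hm n.toNat 0 x).symm
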